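/- GENERATED by farm/mkstatement.py from design/units.split.tsv — do not edit.
   THE SPLIT of the proof unit `vorbis_decode_packet_rest.5` into `vorbis_decode_packet_rest.5a`, `vorbis_decode_packet_rest.5b`, `vorbis_decode_packet_rest.5c`: the children's statements give the parent's
   UNCHANGED statement (so nothing above the parent — callers, compositions — is touched by the split). -/
import Vorbis.Spec.PacketRest5
import Vorbis.Spec.Units.vorbis_decode_packet_rest_5
import Vorbis.Spec.Units.vorbis_decode_packet_rest_5a
import Vorbis.Spec.Units.vorbis_decode_packet_rest_5b
import Vorbis.Spec.Units.vorbis_decode_packet_rest_5c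
namespace Vorbis.Spec.Splits
open X86 X86.User Asan

/-- The children of the split unit `vorbis_decode_packet_rest.5` prove it, by `Vorbis.Spec.vorbis_decode_packet_rest.Seg5.of_parts`. -/
theorem vorbis_decode_packet_rest_5
    (h_vorbis_decode_packet_rest_5a : Vorbis.Spec.vorbis_decode_packet_rest_5a.Statement)
    (h_vorbis_decode_packet_rest_5b : Vorbis.Spec.vorbis_decode_packet_rest_5b.Statement)
    (h_vorbis_decode_packet_rest_5c : Vorbis.Spec.vorbis_decode_packet_rest_5c.Statement) :
    Vorbis.Spec.vorbis_decode_packet_rest_5.Statement := by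
  intro Lay _hLay μ _hμ u₀ _hcode _h_asan_load4_noabort _h_asan_store1_noabort _h_asan_load1_noabort _h_asan_load2_noabort _h_predict_point
  apply Vorbis.Spec.vorbis_decode_packet_rest.Seg5.of_parts
  · exact h_vorbis_decode_packet_rest_5a Lay _hLay μ _hμ u₀ _hcode _h_asan_load4_noabort
  · exact h_vorbis_decode_packet_rest_5b Lay _hLay μ _hμ u₀ _hcode _h_asan_load4_noabort _h_asan_load1_noabort _h_asan_load2_noabort _h_predict_point
  · exact h_vorbis_decode_packet_rest_5c Lay _hLay μ _hμ u₀ _hcode _h_asan_store1_noabort _h_asan_load2_noabort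

end Vorbis.Spec.Splits
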